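-- pv_equiv track=rewrite | github.com/VishalsWorkspace/bi-agent | backend/tools.py | conversion_summary
-- ===== SOURCE A (Python) =====
-- def conversion_summary(deals):
--     total = len(deals)
--
--     high = len([d for d in deals if d.get("probability") == "High"])
--     medium = len([d for d in deals if d.get("probability") == "Medium"])
--     low = len([d for d in deals if d.get("probability") == "Low"])
--
--     return {
--         "total_deals": total,
--         "high": high,
--         "medium": medium,
--         "low": low
--     }
-- ===== SOURCE B (Python) =====
-- def conversion_summary(deals):
--     counts = {}
--     for d in deals:
--         p = d.get("probability")
--         counts[p] = counts.get(p, 0) + 1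
--     return {
--         "total_deals": len(deals),
--         "high": counts.get("High", 0),
--         "medium": counts.get("Medium", 0),
--         "low": counts.get("Low", 0)
--     }
-- ===== Notes on version B (the rewrite author's own statement) =====
-- stated objective: idiomatic
-- what changed: Replaces three filtered-list scans with a single frequency-tabulation pass over deals followed by constant-time dictionary lookups.
import Mathlib
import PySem

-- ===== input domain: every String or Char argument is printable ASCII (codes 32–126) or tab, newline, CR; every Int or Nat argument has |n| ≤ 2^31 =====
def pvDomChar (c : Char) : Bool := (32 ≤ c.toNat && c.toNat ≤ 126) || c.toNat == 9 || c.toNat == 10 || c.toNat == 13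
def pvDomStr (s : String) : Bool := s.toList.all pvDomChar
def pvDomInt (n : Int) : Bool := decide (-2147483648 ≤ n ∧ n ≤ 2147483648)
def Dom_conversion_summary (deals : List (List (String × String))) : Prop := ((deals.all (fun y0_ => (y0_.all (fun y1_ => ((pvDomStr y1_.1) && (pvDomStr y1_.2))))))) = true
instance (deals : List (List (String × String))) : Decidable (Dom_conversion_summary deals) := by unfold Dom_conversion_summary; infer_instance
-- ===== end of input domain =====

-- ===== PORT A =====
-- B replaces A's three filtered scans by one tabulation pass plus lookups (objective: idiomatic single pass).
def conversion_summary (deals : List (List (String × String))) : List (String × Int) :=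
  let total : Int := deals.length
  let high : Int := (deals.filter (fun d => (PySem.Dict.mk d).get? "probability" == some "High")).length
  let medium : Int := (deals.filter (fun d => (PySem.Dict.mk d).get? "probability" == some "Medium")).length
  let low : Int := (deals.filter (fun d => (PySem.Dict.mk d).get? "probability" == some "Low")).length
  [("total_deals", total), ("high", high), ("medium", medium), ("low", low)]

-- ===== PORT B =====
def conversion_summary_alt (deals : List (List (String × String))) : List (String × Int) :=
  let counts : PySem.Dict (Option String) Int :=
    deals.foldl (fun c d =>
      let p := (PySem.Dict.mk d).get? "probability"
      c.insert p (c.getD p 0 + 1)) PySem.Dict.empty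
  [("total_deals", (deals.length : Int)),
   ("high", counts.getD (some "High") 0),
   ("medium", counts.getD (some "Medium") 0),
   ("low", counts.getD (some "Low") 0)]

-- ===== PRECONDITION & SPEC =====
def Spec_conversion_summary (deals : List (List (String × String))) (out : List (String × Int)) : Prop := out = conversion_summary_alt deals
instance (deals : List (List (String × String))) (out : List (String × Int)) : Decidable (Spec_conversion_summary deals out) := by unfold Spec_conversion_summary; infer_instance

-- ===== CLAIM (what is proved, stated in full; the proofs are below) =====
def Claim_equal_conversion_summary : Prop := ∀ (deals : List (List (String × String))), Dom_conversion_summary deals → Spec_conversion_summary deals (conversion_summary deals)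

-- ===== LEMMAS AND PROOFS =====

-- ===== VERDICT (by name: the statement is the Claim_ definition above) =====
lemma counts_getD (deals : List (List (String × String))) (k : Option String) :
    (deals.foldl (fun c d =>
      let p := (PySem.Dict.mk d).get? "probability"
      c.insert p (c.getD p 0 + 1)) (PySem.Dict.empty : PySem.Dict (Option String) Int)).getD k 0
    = ((deals.filter (fun d => (PySem.Dict.mk d).get? "probability" == k)).length : Int) := by
  have h := PySem.Dict.getD_foldl_insert_add_one
    (l := deals.map (fun d => (PySem.Dict.mk d).get? "probability"))
    (d := (PySem.Dict.empty : PySem.Dict (Option String) Int)) (v := k)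
  rw [List.foldl_map] at h
  rw [h]
  simp only [PySem.Dict.getD_empty, zero_add, List.count_eq_countP,
    List.countP_eq_length_filter, List.filter_map, List.length_map, Function.comp_def]

theorem conversion_summary_spec : Claim_equal_conversion_summary := by
  intro deals _
  unfold Spec_conversion_summary conversion_summary conversion_summary_alt
  simp only [counts_getD]
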